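-- pv_equiv track=rewrite | github.com/m-olej/Trees | btree.py | binarySplit
-- ===== SOURCE A (Python) =====
-- def binarySplit(array, binList=[]):
--     arr = array[:]
--     if len(arr) < 1:
--         return []
--     middle_index = len(arr) // 2
--     middle_element = arr.pop(middle_index)
--     left_half = arr[:middle_index]
--     right_half = arr[middle_index:]
--     binList = [middle_element] + binarySplit(left_half, binList) + binarySplit(right_half, binList)
--     return binList
-- ===== SOURCE B (Python) =====
-- def binarySplit(array, binList=[]):
--     arr = array[:]
--     out = []
--     stack = [(0, len(arr))]
--     while stack:
--         lo, hi = stack.pop()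
--         if lo >= hi:
--             continue
--         mid = lo + (hi - lo) // 2
--         out.append(arr[mid])
--         stack.append((mid + 1, hi))
--         stack.append((lo, mid))
--     return out
-- ===== Notes on version B (the rewrite author's own statement) =====
-- stated objective: faster
-- what changed: Replaced A's recursive slice-and-concatenate (which copies subarray slices and rebuilds the result by list concatenation at every recursion level) with an iterative explicit-stack traversal over half-open index ranges of one shared copy, appending each range's middle element to a single output list.
import Mathlib
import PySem

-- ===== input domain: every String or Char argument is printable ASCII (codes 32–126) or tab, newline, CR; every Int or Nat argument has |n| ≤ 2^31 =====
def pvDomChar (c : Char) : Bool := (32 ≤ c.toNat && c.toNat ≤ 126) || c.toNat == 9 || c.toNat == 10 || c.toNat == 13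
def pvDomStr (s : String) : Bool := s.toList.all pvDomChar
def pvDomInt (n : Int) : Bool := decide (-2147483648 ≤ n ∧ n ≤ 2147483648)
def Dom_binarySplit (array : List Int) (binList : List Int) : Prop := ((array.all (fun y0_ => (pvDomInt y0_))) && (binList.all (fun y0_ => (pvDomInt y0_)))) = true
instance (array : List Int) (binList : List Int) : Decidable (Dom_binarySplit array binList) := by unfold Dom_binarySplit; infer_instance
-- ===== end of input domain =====

-- B replaces A's recursive slicing with an iterative explicit-stack range traversal (alternative decomposition, same values).

-- ===== PORT A =====
-- Literal port of A: take middle, recurse on the two halves, concatenate.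
def binarySplit (array : List Int) (binList : List Int) : List Int :=
  if array.length < 1 then []
  else
    let middle_index := array.length / 2
    let middle_element := array.getD middle_index 0   -- arr.pop(middle_index): index is always in range
    let left_half := array.take middle_index
    let right_half := array.drop (middle_index + 1)
    [middle_element] ++ binarySplit left_half binList ++ binarySplit right_half binList
termination_by array.length
decreasing_by
  · simp [List.length_take]; omega
  · simp [List.length_drop]; omega

-- ===== PORT B =====
-- B's while loop over the explicit stack of (lo, hi) ranges, output accumulated by appending.
def bsLoop (arr : List Int) (stack : List (Nat × Nat)) (out : List Int) : List Int :=
  match stack with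
  | [] => out
  | (lo, hi) :: rest =>
    if lo ≥ hi then bsLoop arr rest out
    else
      let mid := lo + (hi - lo) / 2
      bsLoop arr ((lo, mid) :: (mid + 1, hi) :: rest) (out ++ [arr.getD mid 0])
termination_by 2 * (stack.map (fun p => p.2 - p.1)).sum + stack.length
decreasing_by
  · simp; omega
  · simp; omega

def binarySplit_alt (array : List Int) (binList : List Int) : List Int :=
  bsLoop array [(0, array.length)] []

-- ===== PRECONDITION & SPEC =====
def Spec_binarySplit (array : List Int) (binList : List Int) (out : List Int) : Prop := out = binarySplit_alt array binList
instance (array : List Int) (binList : List Int) (out : List Int) : Decidable (Spec_binarySplit array binList out) := by unfold Spec_binarySplit; infer_instance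

-- ===== CLAIM (what is proved, stated in full; the proofs are below) =====
def Claim_equal_binarySplit : Prop := ∀ (array : List Int) (binList : List Int), Dom_binarySplit array binList → Spec_binarySplit array binList (binarySplit array binList)

-- ===== LEMMAS AND PROOFS =====

/-- the contiguous segment `arr[lo:hi]` -/
def bsSub (arr : List Int) (lo hi : Nat) : List Int := (arr.drop lo).take (hi - lo)

theorem bsSub_length (arr : List Int) (lo hi : Nat) (h : hi ≤ arr.length) :
    (bsSub arr lo hi).length = hi - lo := by
  simp [bsSub]; omega

theorem bsSub_getD (arr : List Int) (lo hi m : Nat) (hm : m < hi - lo) :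
    (bsSub arr lo hi).getD m 0 = arr.getD (lo + m) 0 := by
  simp [bsSub, List.getD, List.getElem?_drop, hm]

theorem bsSub_take (arr : List Int) (lo hi m : Nat) (hm : m ≤ hi - lo) :
    (bsSub arr lo hi).take m = bsSub arr lo (lo + m) := by
  simp [bsSub, List.take_take]; omega

theorem bsSub_drop (arr : List Int) (lo hi m : Nat) :
    (bsSub arr lo hi).drop m = bsSub arr (lo + m) (hi - m + m) := by
  simp [bsSub, List.drop_take, List.drop_drop]
  congr 1
  omega

/-- one unfolding of A on the segment `arr[lo:hi]` for a nonempty in-range segment -/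
theorem binarySplit_sub_step (arr : List Int) (b : List Int) (lo hi : Nat)
    (hlo : lo < hi) (hhi : hi ≤ arr.length) :
    binarySplit (bsSub arr lo hi) b =
      arr.getD (lo + (hi - lo) / 2) 0 ::
        (binarySplit (bsSub arr lo (lo + (hi - lo) / 2)) b ++
         binarySplit (bsSub arr (lo + (hi - lo) / 2 + 1) hi) b) := by
  have hl := bsSub_length arr lo hi hhi
  rw [binarySplit]
  have hne : ¬ (bsSub arr lo hi).length < 1 := by omega
  simp only [hl]
  have h1 : (hi - lo) / 2 < hi - lo := by omega
  rw [bsSub_getD arr lo hi _ h1, bsSub_take arr lo hi _ (le_of_lt h1),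
      bsSub_drop arr lo hi ((hi - lo) / 2 + 1)]
  have : hi - ((hi - lo) / 2 + 1) + ((hi - lo) / 2 + 1) = hi := by omega
  rw [this, if_neg (by omega : ¬ hi - lo < 1)]
  simp [Nat.add_assoc]

/-- loop invariant: `bsLoop` emits, after `out`, A's result on each stacked segment in order -/
theorem bsLoop_eq (arr b : List Int) :
    ∀ stack out, (∀ p ∈ stack, p.2 ≤ arr.length) →
      bsLoop arr stack out =
        out ++ (stack.map (fun p => binarySplit (bsSub arr p.1 p.2) b)).flatten := by
  intro stack out
  induction stack, out using bsLoop.induct arr with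
  | case1 out => intro _; simp [bsLoop]
  | case2 out lo hi rest hskip ih =>
    intro hb
    have hsub : bsSub arr lo hi = [] := by
      simp [bsSub]; omega
    rw [bsLoop]
    simp only [hskip, if_true]
    rw [ih (fun p hp => hb p (List.mem_cons_of_mem _ hp))]
    have hz : binarySplit (bsSub arr lo hi) b = [] := by
      rw [hsub, binarySplit]; simp
    simp [hz]
  | case3 out lo hi rest hskip mid ih =>
    intro hb
    have hlo : lo < hi := by omega
    have hhi : hi ≤ arr.length := hb (lo, hi) (List.mem_cons_self ..)
    have hb' : ∀ p ∈ ((lo, lo + (hi - lo) / 2) :: (lo + (hi - lo) / 2 + 1, hi) :: rest),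
        p.2 ≤ arr.length := by
      intro p hp
      simp only [List.mem_cons] at hp
      rcases hp with rfl | rfl | hp
      · simp; omega
      · exact hhi
      · exact hb p (List.mem_cons_of_mem _ hp)
    rw [bsLoop]
    simp only [hskip, if_false]
    rw [ih hb']
    simp only [List.map_cons, List.flatten_cons]
    rw [binarySplit_sub_step arr b lo hi hlo hhi]
    simp [mid]

theorem bsSub_full (arr : List Int) : bsSub arr 0 arr.length = arr := by
  simp [bsSub]

-- ===== VERDICT (by name: the statement is the Claim_ definition above) =====
theorem binarySplit_spec : Claim_equal_binarySplit := by
  intro array binList _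
  unfold Spec_binarySplit binarySplit_alt
  rw [bsLoop_eq array binList [(0, array.length)] [] (by simp)]
  simp [bsSub_full]
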